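-- pv_equiv track=rewrite | github.com/washu-tag/scout | analytics/notebooks/rads/rads_builder.py | get_primary_score
-- ===== SOURCE A (Python) =====
-- def get_primary_score(scores):
--     """
--     Get primary (highest risk) score from a list of scores.
--
--     Args:
--         scores: List of RADS scores
--
--     Returns:
--         Primary score or None
--     """
--     if not scores:
--         return None
--
--     # Detect score type from first score
--     first_score = scores[0]
--
--     if first_score.startswith("LR-"):
--         # Priority order for LI-RADS (highest risk first)
--         # LR-TR (treated) is placed after LR-4 as it represents a previously treated lesion
--         priority = [
--             "LR-M",
--             "LR-5",
--             "LR-TIV",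
--             "LR-4",
--             "LR-TR",
--             "LR-3",
--             "LR-2",
--             "LR-1",
--             "LR-NC",
--         ]
--     elif first_score.startswith("BI-RADS-"):
--         # Priority order for BI-RADS (highest risk first)
--         # 6 = known malignancy, 5 = highly suggestive of malignancy
--         # 4C > 4B > 4A for subcategories
--         priority = [
--             "BI-RADS-6",
--             "BI-RADS-5",
--             "BI-RADS-4C",
--             "BI-RADS-4B",
--             "BI-RADS-4A",
--             "BI-RADS-4",
--             "BI-RADS-3",
--             "BI-RADS-2",
--             "BI-RADS-1",
--             "BI-RADS-0",
--         ]
--     else: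
--         # Default for PI-RADS or unknown
--         priority = ["5", "4", "3", "2", "1"]
--
--     for p in priority:
--         if p in scores:
--             return p
--
--     return scores[0]  # Fallback to first score
-- ===== SOURCE B (Python) =====
-- def get_primary_score(scores):
--     if not scores:
--         return None
--
--     first_score = scores[0]
--
--     if first_score.startswith("LR-"):
--         priority = ["LR-M", "LR-5", "LR-TIV", "LR-4", "LR-TR", "LR-3", "LR-2", "LR-1", "LR-NC"]
--     elif first_score.startswith("BI-RADS-"):
--         priority = ["BI-RADS-6", "BI-RADS-5", "BI-RADS-4C", "BI-RADS-4B", "BI-RADS-4A",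
--                     "BI-RADS-4", "BI-RADS-3", "BI-RADS-2", "BI-RADS-1", "BI-RADS-0"]
--     else:
--         priority = ["5", "4", "3", "2", "1"]
--
--     rank = {p: i for i, p in enumerate(priority)}
--     n = len(priority)
--     # min is first-wins: if no score is ranked, every key equals n and scores[0] wins
--     return min(scores, key=lambda s: rank.get(s, n))
-- ===== Notes on version B (the rewrite author's own statement) =====
-- stated objective: alternative
-- what changed: A scans the scores list once per priority entry and returns the first priority value present; B builds a rank dictionary from the priority list once and takes the minimum of scores by rank in a single pass (first-wins min, unranked scores get rank len(priority), so scores[0] wins when nothing is ranked).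
import Mathlib
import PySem

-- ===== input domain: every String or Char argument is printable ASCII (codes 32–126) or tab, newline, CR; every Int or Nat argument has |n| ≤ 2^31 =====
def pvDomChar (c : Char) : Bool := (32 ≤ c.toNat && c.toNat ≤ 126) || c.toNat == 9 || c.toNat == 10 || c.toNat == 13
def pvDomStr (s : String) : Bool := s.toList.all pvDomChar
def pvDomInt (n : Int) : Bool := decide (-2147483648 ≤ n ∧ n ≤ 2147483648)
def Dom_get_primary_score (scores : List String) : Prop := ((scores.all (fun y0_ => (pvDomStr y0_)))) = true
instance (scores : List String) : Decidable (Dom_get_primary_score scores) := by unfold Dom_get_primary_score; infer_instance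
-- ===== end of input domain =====

-- B replaces A's scan of `scores` once per priority entry by one pass over `scores`
-- against a precomputed rank dictionary (min by rank, first-wins); objective: alternative.

-- ===== PORT A =====
-- shared prefix of both Pythons: pick the priority list from the first score's prefix
def pvPriorityOf (first_score : String) : List String :=
  if PySem.Str.startswith first_score "LR-" then
    ["LR-M", "LR-5", "LR-TIV", "LR-4", "LR-TR", "LR-3", "LR-2", "LR-1", "LR-NC"]
  else if PySem.Str.startswith first_score "BI-RADS-" then
    ["BI-RADS-6", "BI-RADS-5", "BI-RADS-4C", "BI-RADS-4B", "BI-RADS-4A",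
     "BI-RADS-4", "BI-RADS-3", "BI-RADS-2", "BI-RADS-1", "BI-RADS-0"]
  else
    ["5", "4", "3", "2", "1"]

-- A's loop: `for p in priority: if p in scores: return p`
def pvPriorityLoop : List String → List String → Option String
  | [], _ => none
  | p :: rest, scores => if p ∈ scores then some p else pvPriorityLoop rest scores

def get_primary_score (scores : List String) : Option String :=
  match scores with
  | [] => none
  | first_score :: _ =>
    match pvPriorityLoop (pvPriorityOf first_score) scores with
    | some p => some p
    | none => some first_score

-- ===== PORT B =====
def get_primary_score_alt (scores : List String) : Option String :=
  match scores with
  | [] => none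
  | first_score :: _ =>
    let priority := pvPriorityOf first_score
    let rank : PySem.Dict String Int :=
      (PySem.List.enumerate priority 0).foldl (fun d ip => d.insert ip.2 ip.1) PySem.Dict.empty
    let n : Int := priority.length
    PySem.List.min? scores (fun s => rank.getD s n)

-- ===== PRECONDITION & SPEC =====
def Spec_get_primary_score (scores : List String) (out : Option String) : Prop := out = get_primary_score_alt scores
instance (scores : List String) (out : Option String) : Decidable (Spec_get_primary_score scores out) := by unfold Spec_get_primary_score; infer_instance

-- ===== CLAIM (what is proved, stated in full; the proofs are below) =====
def Claim_equal_get_primary_score : Prop := ∀ (scores : List String), Dom_get_primary_score scores → Spec_get_primary_score scores (get_primary_score scores)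

-- ===== LEMMAS AND PROOFS =====

-- B's key, expressed through the position of s in the priority list
def pvKey (P : List String) (s : String) : Int :=
  match PySem.List.index? P s with
  | some k => (k : Int)
  | none => (P.length : Int)

lemma pvPriorityOf_nodup (s : String) : (pvPriorityOf s).Nodup := by
  unfold pvPriorityOf; split_ifs <;> decide

-- the rank-dictionary fold looks up as index?-based rank
lemma pvRank_getD (P : List String) (hnd : P.Nodup) (st : Int) (d : PySem.Dict String Int)
    (s : String) (v : Int) :
    ((PySem.List.enumerate P st).foldl (fun d ip => d.insert ip.2 ip.1) d).getD s v
      = match PySem.List.index? P s with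
        | some k => st + (k : Int)
        | none => d.getD s v := by
  induction P generalizing st d with
  | nil => simp [PySem.List.enumerate_nil, PySem.List.index?]
  | cons p P ih =>
    rw [PySem.List.enumerate_cons]
    simp only [List.foldl_cons]
    by_cases hsp : s = p
    · subst hsp
      rw [ih (List.nodup_cons.mp hnd).2 (st + 1) (d.insert s st)]
      have hnotmem : s ∉ P := (List.nodup_cons.mp hnd).1
      rw [(PySem.List.index?_eq_none_iff P s).mpr hnotmem,
          PySem.List.index?_cons_self]
      simp [PySem.Dict.getD_insert_self]
    · rw [ih (List.nodup_cons.mp hnd).2 (st + 1) (d.insert p st)]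
      rw [PySem.List.index?_cons_of_ne P (fun h => hsp h.symm)]
      cases h : PySem.List.index? P s with
      | none => simp [PySem.Dict.getD_insert_of_ne _ _ _ hsp]
      | some k => simp; ring

lemma pvLoop_none (P scores : List String) :
    pvPriorityLoop P scores = none ↔ ∀ p ∈ P, p ∉ scores := by
  induction P with
  | nil => simp [pvPriorityLoop]
  | cons p P ih =>
    simp only [pvPriorityLoop]
    split_ifs with h
    · simp [h]
    · simp [h, ih]

lemma pvLoop_some (P scores : List String) (p : String) (h : pvPriorityLoop P scores = some p) :
    p ∈ scores ∧ ∃ pre suf, P = pre ++ p :: suf ∧ ∀ q ∈ pre, q ∉ scores := by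
  induction P with
  | nil => simp [pvPriorityLoop] at h
  | cons q P ih =>
    simp only [pvPriorityLoop] at h
    split_ifs at h with hq
    · cases h
      exact ⟨hq, [], P, rfl, by simp⟩
    · obtain ⟨hp, pre, suf, hP, hpre⟩ := ih h
      exact ⟨hp, q :: pre, suf, by rw [hP]; rfl, by
        intro x hx
        rcases List.mem_cons.mp hx with h1 | h1
        · subst h1; exact hq
        · exact hpre x h1⟩

-- first-wins min over a constant key returns the first element
lemma pvMin_const (key : String → Int) (first : String) (rest : List String)
    (h : ∀ x ∈ rest, key x = key first) :
    PySem.List.min? (first :: rest) key = some first := by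
  induction rest with
  | nil => rfl
  | cons x xs ih =>
    have hx : key x = key first := h x (by simp)
    have step : PySem.List.min? (first :: x :: xs) key = PySem.List.min? (first :: xs) key := by
      simp only [PySem.List.min?, List.foldl_cons]
      rw [hx, if_neg (lt_irrefl _)]
    rw [step]
    exact ih (fun y hy => h y (by simp [hy]))

lemma pvCore (P : List String) (hnd : P.Nodup) (first : String) (rest : List String) :
    (match pvPriorityLoop P (first :: rest) with
     | some p => some p
     | none => some first)
      = PySem.List.min? (first :: rest) (fun s => pvKey P s) := by
  cases h : pvPriorityLoop P (first :: rest) with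
  | none =>
    have hall := (pvLoop_none P (first :: rest)).mp h
    have hconst : ∀ s ∈ first :: rest, pvKey P s = (P.length : Int) := by
      intro s hs
      have hsn : s ∉ P := fun hmem => hall s hmem hs
      unfold pvKey
      rw [(PySem.List.index?_eq_none_iff P s).mpr hsn]
    rw [pvMin_const _ first rest (fun x hx => by
      rw [hconst x (by simp [hx]), hconst first (by simp)])]
  | some p =>
    obtain ⟨hp, pre, suf, hP, hpre⟩ := pvLoop_some P (first :: rest) p h
    subst hP
    have hpnotin : p ∉ pre := by
      intro hmem
      exact (List.nodup_append.mp hnd).2.2 p hmem p (by simp) rfl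
    have hidx : PySem.List.index? (pre ++ p :: suf) p = some pre.length :=
      (PySem.List.index?_eq_some_iff _ p pre.length).mpr ⟨pre, suf, rfl, rfl, hpnotin⟩
    have hkeyp : pvKey (pre ++ p :: suf) p = (pre.length : Int) := by
      unfold pvKey; rw [hidx]
    have hlb : ∀ s ∈ first :: rest, (pre.length : Int) ≤ pvKey (pre ++ p :: suf) s := by
      intro s hs
      unfold pvKey
      cases hi : PySem.List.index? (pre ++ p :: suf) s with
      | none =>
        simp only [List.length_append, List.length_cons]
        omega
      | some k =>
        simp only [Nat.cast_le]
        by_contra hk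
        replace hk : k < pre.length := by omega
        obtain ⟨hklt, hPk, _⟩ := PySem.List.getElem_of_index?_eq_some hi
        rw [List.getElem_append_left hk] at hPk
        exact hpre s (hPk ▸ List.getElem_mem _) hs
    obtain ⟨m, hm⟩ : ∃ m, PySem.List.min? (first :: rest) (fun s => pvKey (pre ++ p :: suf) s) = some m := by
      cases hmm : PySem.List.min? (first :: rest) (fun s => pvKey (pre ++ p :: suf) s) with
      | none => exact absurd ((PySem.List.min?_eq_none_iff _ _).mp hmm) (by simp)
      | some m => exact ⟨m, rfl⟩
    have h1 : pvKey (pre ++ p :: suf) m ≤ pvKey (pre ++ p :: suf) p := PySem.List.min?_isMin hm p hp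
    have h2 : (pre.length : Int) ≤ pvKey (pre ++ p :: suf) m := hlb m (PySem.List.min?_mem hm)
    have hkeq : pvKey (pre ++ p :: suf) m = (pre.length : Int) := by rw [hkeyp] at h1; omega
    have hmp : m = p := by
      unfold pvKey at hkeq
      cases hi : PySem.List.index? (pre ++ p :: suf) m with
      | none =>
        rw [hi] at hkeq
        have hkeq' : (((pre ++ p :: suf).length : Int)) = (pre.length : Int) := hkeq
        simp only [List.length_append, List.length_cons] at hkeq'
        push_cast at hkeq'
        omega
      | some k =>
        rw [hi] at hkeq
        have hkeq' : (k : Int) = (pre.length : Int) := hkeq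
        have hkk : k = pre.length := by exact_mod_cast hkeq'
        subst hkk
        obtain ⟨hklt, hPk, _⟩ := PySem.List.getElem_of_index?_eq_some hi
        rw [List.getElem_append_right (Nat.le_refl _)] at hPk
        simp at hPk
        exact hPk.symm
    rw [hm, hmp]

-- ===== VERDICT (by name: the statement is the Claim_ definition above) =====
theorem get_primary_score_spec : Claim_equal_get_primary_score := by
  intro scores _
  unfold Spec_get_primary_score
  cases scores with
  | nil => rfl
  | cons first rest =>
    simp only [get_primary_score, get_primary_score_alt]
    have hk : (fun s => ((PySem.List.enumerate (pvPriorityOf first) 0).foldl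
          (fun d ip => d.insert ip.2 ip.1) PySem.Dict.empty).getD s ((pvPriorityOf first).length : Int))
        = fun s => pvKey (pvPriorityOf first) s := by
      funext s
      rw [pvRank_getD (pvPriorityOf first) (pvPriorityOf_nodup first) 0 PySem.Dict.empty s _]
      unfold pvKey
      cases h : PySem.List.index? (pvPriorityOf first) s with
      | none => simp [PySem.Dict.getD_empty]
      | some k => simp
    rw [hk]
    exact pvCore (pvPriorityOf first) (pvPriorityOf_nodup first) first rest
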